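-- pv_equiv track=rewrite | github.com/lsy818/AlphaApollo | alphaapollo/workflows/common.py | normalize_unknown_overrides
-- ===== SOURCE A (Python) =====
-- from typing import List
--
-- def normalize_unknown_overrides(tokens: List[str]) -> List[str]:
--     overrides: List[str] = []
--     i = 0
--     while i < len(tokens):
--         token = tokens[i]
--         if not token.startswith("--"):
--             overrides.append(token)
--             i += 1
--             continue
--         key = token[2:]
--         if "=" in key:
--             overrides.append(key)
--             i += 1
--             continue
--         if i + 1 < len(tokens) and not tokens[i + 1].startswith("--"):
--             overrides.append(f"{key}={tokens[i + 1]}")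
--             i += 2
--         else:
--             i += 1
--
--     return overrides
-- ===== SOURCE B (Python) =====
-- from typing import List
--
-- def normalize_unknown_overrides(tokens: List[str]) -> List[str]:
--     overrides: List[str] = []
--     pending = None
--     for token in tokens:
--         if token.startswith("--"):
--             pending = None
--             key = token[2:]
--             if "=" in key:
--                 overrides.append(key)
--             else:
--                 pending = key
--         elif pending is not None:
--             overrides.append(f"{pending}={token}")
--             pending = None
--         else:
--             overrides.append(token)
--     return overrides
-- ===== Notes on version B (the rewrite author's own statement) =====
-- stated objective: idiomatic
-- what changed: Replaced the index-based while loop with variable step (1 or 2) and look-ahead into tokens[i+1] by a single forward for-loop that carries a `pending` key and decides each token locally.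
import Mathlib
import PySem

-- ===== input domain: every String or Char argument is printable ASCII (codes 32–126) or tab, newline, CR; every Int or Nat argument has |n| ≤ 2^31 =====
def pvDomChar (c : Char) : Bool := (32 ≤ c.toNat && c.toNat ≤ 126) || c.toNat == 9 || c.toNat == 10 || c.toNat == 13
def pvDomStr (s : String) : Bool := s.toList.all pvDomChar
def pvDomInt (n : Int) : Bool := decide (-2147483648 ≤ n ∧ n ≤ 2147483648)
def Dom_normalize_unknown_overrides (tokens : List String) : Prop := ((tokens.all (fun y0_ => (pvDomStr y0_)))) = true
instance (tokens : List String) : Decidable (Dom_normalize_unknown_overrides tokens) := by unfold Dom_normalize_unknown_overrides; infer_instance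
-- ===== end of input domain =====

-- B replaces A's index-based while loop with look-ahead and variable step by a single
-- forward pass carrying a `pending` key variable (more idiomatic; same O(n) cost).

-- ===== PORT A =====
-- A's while loop advances i by 1 or 2 through `tokens`; ported as the obvious recursion
-- on the remaining suffix (consuming 1 or 2 elements), with the same `overrides`
-- accumulator; the look-ahead `tokens[i+1]` is the head of the remaining suffix.
def normalize_unknown_overrides_loop (overrides : List String) (ts : List String) : List String :=
  match ts with
  | [] => overrides
  | token :: rest =>
    if ¬ PySem.Str.startswith token "--" then
      normalize_unknown_overrides_loop (overrides ++ [token]) rest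
    else
      let key := PySem.Str.slice token (some 2) none
      if PySem.Str.isIn "=" key then
        normalize_unknown_overrides_loop (overrides ++ [key]) rest
      else
        match rest with
        | next :: rest' =>
          if ¬ PySem.Str.startswith next "--" then
            normalize_unknown_overrides_loop (overrides ++ [key ++ "=" ++ next]) rest'
          else
            normalize_unknown_overrides_loop overrides (next :: rest')
        | [] => normalize_unknown_overrides_loop overrides []
termination_by ts.length
decreasing_by all_goals simp

def normalize_unknown_overrides (tokens : List String) : List String :=
  normalize_unknown_overrides_loop [] tokens

-- ===== PORT B =====
-- Source B's for-loop over tokens, folding the state (overrides, pending).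
def normalize_unknown_overrides_alt_step (st : List String × Option String) (token : String) :
    List String × Option String :=
  if PySem.Str.startswith token "--" then
    let key := PySem.Str.slice token (some 2) none
    if PySem.Str.isIn "=" key then (st.1 ++ [key], none)
    else (st.1, some key)
  else
    match st.2 with
    | some pending => (st.1 ++ [pending ++ "=" ++ token], none)
    | none => (st.1 ++ [token], none)

def normalize_unknown_overrides_alt (tokens : List String) : List String :=
  (tokens.foldl normalize_unknown_overrides_alt_step ([], none)).1

-- ===== PRECONDITION & SPEC =====
def Spec_normalize_unknown_overrides (tokens : List String) (out : List String) : Prop := out = normalize_unknown_overrides_alt tokens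
instance (tokens : List String) (out : List String) : Decidable (Spec_normalize_unknown_overrides tokens out) := by unfold Spec_normalize_unknown_overrides; infer_instance

-- ===== CLAIM (what is proved, stated in full; the proofs are below) =====
def Claim_equal_normalize_unknown_overrides : Prop := ∀ (tokens : List String), Dom_normalize_unknown_overrides tokens → Spec_normalize_unknown_overrides tokens (normalize_unknown_overrides tokens)

-- ===== LEMMAS AND PROOFS =====

-- Non-accumulator form of B's loop, used only in the proofs.
def runB (pending : Option String) : List String → List String
  | [] => []
  | token :: rest =>
    if PySem.Str.startswith token "--" then
      let key := PySem.Str.slice token (some 2) none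
      if PySem.Str.isIn "=" key then key :: runB none rest
      else runB (some key) rest
    else
      -- Python's `pending is not None` check, as Option.elim
      pending.elim (token :: runB none rest) (fun p => (p ++ "=" ++ token) :: runB none rest)

theorem foldl_eq_runB (ts : List String) : ∀ (ov : List String) (p : Option String),
    (ts.foldl normalize_unknown_overrides_alt_step (ov, p)).1 = ov ++ runB p ts := by
  induction ts with
  | nil => intro ov p; rw [runB]; simp
  | cons t rest ih =>
    intro ov p
    rw [List.foldl_cons, runB]
    by_cases h : PySem.Str.startswith t "--"
    · by_cases he : PySem.Str.isIn "=" (PySem.Str.slice t (some 2) none)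
      · have hs : normalize_unknown_overrides_alt_step (ov, p) t =
            (ov ++ [PySem.Str.slice t (some 2) none], none) := by
          unfold normalize_unknown_overrides_alt_step
          rw [if_pos h, if_pos he]
        rw [if_pos h, if_pos he, hs, ih]
        simp
      · have hs : normalize_unknown_overrides_alt_step (ov, p) t =
            (ov, some (PySem.Str.slice t (some 2) none)) := by
          unfold normalize_unknown_overrides_alt_step
          rw [if_pos h, if_neg he]
        rw [if_pos h, if_neg he, hs, ih]
    · cases p with
      | some q =>
        have hs : normalize_unknown_overrides_alt_step (ov, some q) t =
            (ov ++ [q ++ "=" ++ t], none) := by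
          unfold normalize_unknown_overrides_alt_step
          rw [if_neg h]
        rw [if_neg h, hs, ih]
        simp [Option.elim]
      | none =>
        have hs : normalize_unknown_overrides_alt_step (ov, none) t =
            (ov ++ [t], none) := by
          unfold normalize_unknown_overrides_alt_step
          rw [if_neg h]
        rw [if_neg h, hs, ih]
        simp [Option.elim]

-- A pending key is irrelevant when the next token is again a `--` flag (or absent).
theorem runB_pending_irrel (k next : String) (rest' : List String)
    (hn : PySem.Str.startswith next "--" = true) :
    runB (some k) (next :: rest') = runB none (next :: rest') := by
  rw [runB, runB, if_pos hn, if_pos hn]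

theorem loopA_eq_runB : ∀ (n : Nat) (ts : List String), ts.length ≤ n → ∀ (ov : List String),
    normalize_unknown_overrides_loop ov ts = ov ++ runB none ts := by
  intro n
  induction n with
  | zero =>
    intro ts hlen ov
    cases ts with
    | nil => rw [normalize_unknown_overrides_loop, runB]; simp
    | cons t r => simp at hlen
  | succ m ih =>
    intro ts hlen ov
    cases ts with
    | nil => rw [normalize_unknown_overrides_loop, runB]; simp
    | cons t rest =>
      rw [normalize_unknown_overrides_loop, runB]
      by_cases h : PySem.Str.startswith t "--"
      · rw [if_neg (not_not_intro h), if_pos h]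
        by_cases he : PySem.Str.isIn "=" (PySem.Str.slice t (some 2) none)
        · rw [if_pos he, if_pos he, ih rest (by simpa using Nat.le_of_succ_le_succ hlen)]
          simp
        · rw [if_neg he, if_neg he]
          cases rest with
          | nil => rw [normalize_unknown_overrides_loop, runB]; simp
          | cons next rest' =>
            have hred : (match next :: rest' with
                | next :: rest' =>
                  if ¬ PySem.Str.startswith next "--" = true then
                    normalize_unknown_overrides_loop
                      (ov ++ [PySem.Str.slice t (some 2) none ++ "=" ++ next]) rest'
                  else normalize_unknown_overrides_loop ov (next :: rest')
                | [] => normalize_unknown_overrides_loop ov []) =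
                (if ¬ PySem.Str.startswith next "--" = true then
                    normalize_unknown_overrides_loop
                      (ov ++ [PySem.Str.slice t (some 2) none ++ "=" ++ next]) rest'
                  else normalize_unknown_overrides_loop ov (next :: rest')) := rfl
            rw [hred]
            by_cases hn : PySem.Str.startswith next "--"
            · rw [if_neg (not_not_intro hn),
                ih (next :: rest') (by simpa using Nat.le_of_succ_le_succ hlen),
                runB_pending_irrel _ _ _ hn]
            · rw [if_pos hn, runB, if_neg hn,
                ih rest' (by simp at hlen; omega)]
              simp [Option.elim]
      · rw [if_pos (by simpa using h), if_neg h,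
          ih rest (by simpa using Nat.le_of_succ_le_succ hlen)]
        simp
-- ===== VERDICT (by name: the statement is the Claim_ definition above) =====
theorem normalize_unknown_overrides_spec : Claim_equal_normalize_unknown_overrides := by
  intro tokens _
  unfold Spec_normalize_unknown_overrides normalize_unknown_overrides normalize_unknown_overrides_alt
  rw [loopA_eq_runB tokens.length tokens le_rfl, foldl_eq_runB]
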